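-- pv_equiv track=rewrite | github.com/mmk1209/PDDL_NL_PLAN_VALIDATOR | problem_validation/generate_problem.py | summarize_val_error
-- ===== SOURCE A (Python) =====
-- def summarize_val_error(output: str) -> str:
--     """Pick key VAL lines plus a bit of context for LLM repair."""
--
--     lines = [l.strip() for l in output.splitlines() if l.strip()]
--     key_idx = []
--     for i, l in enumerate(lines):
--         ll = l.lower()
--         if "error" in ll or "errors:" in ll or "parser" in ll or "line" in ll:
--             key_idx.append(i)
--     # collect context around matched lines
--     picked = []
--     for i in key_idx:
--         for j in range(max(0, i - 1), min(len(lines), i + 2)):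
--             picked.append(lines[j])
--     if not picked:
--         picked = lines[-5:]  # fallback: last few lines
--     # dedup while preserving order
--     seen = set()
--     summary = []
--     for l in picked:
--         if l not in seen:
--             seen.add(l)
--             summary.append(l)
--     return "\n".join(summary)
-- ===== SOURCE B (Python) =====
-- def summarize_val_error(output: str) -> str:
--     """Pick key VAL lines plus a bit of context for LLM repair."""
--
--     lines = [l.strip() for l in output.splitlines() if l.strip()]
--     n = len(lines)
--
--     def key(i: int) -> bool:
--         if i < 0 or i >= n:
--             return False
--         ll = lines[i].lower()
--         return "error" in ll or "parser" in ll or "line" in ll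
--
--     any_key = any(key(i) for i in range(n))
--     seen = set()
--     parts = []
--     for i, l in enumerate(lines):
--         keep = (key(i - 1) or key(i) or key(i + 1)) if any_key else i + 5 >= n
--         if keep and l not in seen:
--             seen.add(l)
--             parts.append(l)
--     return "\n".join(parts)
-- ===== Notes on version B (the rewrite author's own statement) =====
-- stated objective: simpler
-- what changed: Instead of materialising a key-index list, concatenating overlapping context windows into a 'picked' list and deduplicating it afterwards, B makes a single pass over the lines, keeping line i exactly when a keyword line lies at i-1, i or i+1 (or, if no line matches, when i is among the last five), deduplicating on the fly; no intermediate lists are built.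
import Mathlib
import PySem

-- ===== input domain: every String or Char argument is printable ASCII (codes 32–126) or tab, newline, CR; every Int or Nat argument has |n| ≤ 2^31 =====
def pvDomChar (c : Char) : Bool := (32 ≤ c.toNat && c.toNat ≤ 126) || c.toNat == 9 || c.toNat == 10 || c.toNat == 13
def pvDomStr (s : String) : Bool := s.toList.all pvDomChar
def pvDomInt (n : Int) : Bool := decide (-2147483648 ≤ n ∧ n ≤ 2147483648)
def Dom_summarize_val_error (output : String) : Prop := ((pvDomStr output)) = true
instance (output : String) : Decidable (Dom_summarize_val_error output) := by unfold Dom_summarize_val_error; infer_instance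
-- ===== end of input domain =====

-- B keeps each line whose neighbourhood holds a keyword (or one of the last five when none matches) in one
-- deduplicating pass, instead of A's key-index list + concatenated context windows + posterior dedup; objective: simpler.

-- ===== PORT A =====
def summarize_val_error (output : String) : String :=
  let lines := ((PySem.Str.splitlines output).filter (fun l => PySem.Str.strip l ≠ "")).map PySem.Str.strip
  let key_idx : List Int := (PySem.List.enumerate lines).foldl (fun acc p =>
      if PySem.Str.isIn "error" (PySem.Str.lower p.2) || PySem.Str.isIn "errors:" (PySem.Str.lower p.2) ||
         PySem.Str.isIn "parser" (PySem.Str.lower p.2) || PySem.Str.isIn "line" (PySem.Str.lower p.2)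
      then acc ++ [p.1] else acc) []
  let picked := key_idx.foldl (fun acc i =>
      acc ++ (PySem.List.pyRange (max 0 (i - 1)) (min (lines.length : Int) (i + 2))).map
        (fun j => PySem.List.pyGetD lines j "")) []
  let picked := if picked = [] then PySem.List.slice lines (some (-5)) none else picked
  let st := picked.foldl (fun (st : PySem.Set String × List String) l =>
      if PySem.Set.contains st.1 l then st else (PySem.Set.add st.1 l, st.2 ++ [l]))
      (PySem.Set.empty, [])
  PySem.Str.join "\n" st.2

-- ===== PORT B =====
-- B helper: key(i) — does line i (0-based; out of range gives False) contain a keyword?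
def pvKeyB (lines : List String) (i : Int) : Bool :=
  if i < 0 || (lines.length : Int) ≤ i then false
  else
    PySem.Str.isIn "error" (PySem.Str.lower (PySem.List.pyGetD lines i "")) ||
    PySem.Str.isIn "parser" (PySem.Str.lower (PySem.List.pyGetD lines i "")) ||
    PySem.Str.isIn "line" (PySem.Str.lower (PySem.List.pyGetD lines i ""))

def summarize_val_error_alt (output : String) : String :=
  let lines := ((PySem.Str.splitlines output).filter (fun l => PySem.Str.strip l ≠ "")).map PySem.Str.strip
  let n : Int := lines.length
  let anyKey := (PySem.List.pyRange 0 n).any (fun i => pvKeyB lines i)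
  let st := (PySem.List.enumerate lines).foldl (fun (st : PySem.Set String × List String) p =>
      if (if anyKey then pvKeyB lines (p.1 - 1) || pvKeyB lines p.1 || pvKeyB lines (p.1 + 1)
          else decide (n ≤ p.1 + 5)) && !(PySem.Set.contains st.1 p.2)
      then (PySem.Set.add st.1 p.2, st.2 ++ [p.2]) else st)
      (PySem.Set.empty, [])
  PySem.Str.join "\n" st.2

-- ===== PRECONDITION & SPEC =====
def Spec_summarize_val_error (output : String) (out : String) : Prop := out = summarize_val_error_alt output
instance (output : String) (out : String) : Decidable (Spec_summarize_val_error output out) := by unfold Spec_summarize_val_error; infer_instance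

-- ===== CLAIM (what is proved, stated in full; the proofs are below) =====
def Claim_equal_summarize_val_error : Prop := ∀ (output : String), Dom_summarize_val_error output → Spec_summarize_val_error output (summarize_val_error output)

-- ===== LEMMAS AND PROOFS =====

-- proof-side canonical notions
def pvGd (L : List String) (j : Nat) : String := L.getD j ""

def pvP (l : String) : Bool :=
  PySem.Str.isIn "error" (PySem.Str.lower l) || PySem.Str.isIn "parser" (PySem.Str.lower l) ||
  PySem.Str.isIn "line" (PySem.Str.lower l)

def pvKeyN (L : List String) (j : Nat) : Bool := decide (j < L.length) && pvP (pvGd L j)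

def pvSel (L : List String) (j : Nat) : Bool :=
  (decide (1 ≤ j) && pvKeyN L (j - 1)) || pvKeyN L j || pvKeyN L (j + 1)

def pvWin (n k : Nat) : List Nat := List.range' (k - 1) (min n (k + 2) - (k - 1))

def pvKeys (L : List String) : List Nat := (List.range L.length).filter (fun j => pvP (pvGd L j))

def pvDedup {α : Type} [DecidableEq α] (seen : List α) : List α → List α
  | [] => []
  | x :: xs => if x ∈ seen then pvDedup seen xs else x :: pvDedup (seen ++ [x]) xs

-- A's keyword test equals B's: "errors:" contains "error", so that disjunct is redundant
theorem pvP_cond (l : String) :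
    (PySem.Str.isIn "error" (PySem.Str.lower l) || PySem.Str.isIn "errors:" (PySem.Str.lower l) ||
     PySem.Str.isIn "parser" (PySem.Str.lower l) || PySem.Str.isIn "line" (PySem.Str.lower l)) = pvP l := by
  cases h2 : PySem.Str.isIn "errors:" (PySem.Str.lower l) with
  | false => simp [pvP, h2]
  | true =>
    have h1 : PySem.Str.isIn "error" (PySem.Str.lower l) = true := by
      rw [PySem.Str.isIn_iff_infix] at h2 ⊢
      exact List.IsInfix.trans (by decide) h2
    unfold pvP
    simp only [h1, h2, Bool.true_or]

theorem pvDedup_congr {α : Type} [DecidableEq α] (xs : List α) :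
    ∀ (s t : List α), (∀ a ∈ xs, (a ∈ s ↔ a ∈ t)) → pvDedup s xs = pvDedup t xs := by
  induction xs with
  | nil => intro s t _; rfl
  | cons x xs ih =>
    intro s t h
    have hx := h x (by simp)
    by_cases hs : x ∈ s
    · rw [pvDedup, pvDedup, if_pos hs, if_pos (hx.mp hs)]
      exact ih s t (fun a ha => h a (by simp [ha]))
    · have ht : x ∉ t := fun c => hs (hx.mpr c)
      rw [pvDedup, pvDedup, if_neg hs, if_neg ht]
      refine congrArg (x :: ·) (ih _ _ (fun a ha => ?_))
      simp only [List.mem_append, List.mem_singleton]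
      exact or_congr (h a (by simp [ha])) Iff.rfl

theorem pvDedup_append {α : Type} [DecidableEq α] (xs : List α) :
    ∀ (S ys : List α), pvDedup S (xs ++ ys) = pvDedup S xs ++ pvDedup (S ++ xs) ys := by
  induction xs with
  | nil => intro S ys; simp [pvDedup]
  | cons x xs ih =>
    intro S ys
    by_cases hs : x ∈ S
    · rw [List.cons_append, pvDedup, pvDedup, if_pos hs, if_pos hs, ih S ys]
      have he : pvDedup (S ++ xs) ys = pvDedup (S ++ x :: xs) ys := by
        apply pvDedup_congr
        intro a _
        simp only [List.mem_append, List.mem_cons]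
        constructor
        · rintro (h | h)
          · exact Or.inl h
          · exact Or.inr (Or.inr h)
        · rintro (h | h | h)
          · exact Or.inl h
          · exact Or.inl (h ▸ hs)
          · exact Or.inr h
      rw [he]
    · rw [List.cons_append, pvDedup, pvDedup, if_neg hs, if_neg hs, ih (S ++ [x]) ys]
      have h2 : S ++ [x] ++ xs = S ++ x :: xs := by simp
      rw [h2, List.cons_append]

theorem pvMem_dedup {α : Type} [DecidableEq α] (xs : List α) :
    ∀ (S : List α) (a : α), a ∈ pvDedup S xs ↔ a ∈ xs ∧ a ∉ S := by
  induction xs with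
  | nil => intro S a; simp [pvDedup]
  | cons x xs ih =>
    intro S a
    by_cases hs : x ∈ S
    · rw [pvDedup, if_pos hs, ih]
      simp only [List.mem_cons]
      constructor
      · rintro ⟨h1, h2⟩; exact ⟨Or.inr h1, h2⟩
      · rintro ⟨h1, h2⟩
        rcases h1 with rfl | h1
        · exact absurd hs h2
        · exact ⟨h1, h2⟩
    · rw [pvDedup, if_neg hs, List.mem_cons, ih]
      simp only [List.mem_append, List.mem_singleton, List.mem_cons, List.not_mem_nil, or_false]
      constructor
      · rintro (rfl | ⟨h1, h2⟩)
        · exact ⟨Or.inl rfl, hs⟩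
        · exact ⟨Or.inr h1, fun c => h2 (Or.inl c)⟩
      · rintro ⟨h1 | h1, h2⟩
        · exact Or.inl h1
        · by_cases hax : a = x
          · exact Or.inl hax
          · exact Or.inr ⟨h1, fun c => c.elim h2 hax⟩

theorem pvDedup_nodup {α : Type} [DecidableEq α] (xs : List α) :
    ∀ (S : List α), xs.Nodup → pvDedup S xs = xs.filter (fun a => decide (a ∉ S)) := by
  induction xs with
  | nil => intro S _; rfl
  | cons x xs ih =>
    intro S h
    obtain ⟨hx, h'⟩ := List.nodup_cons.mp h
    by_cases hs : x ∈ S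
    · rw [pvDedup, if_pos hs, List.filter_cons, ih S h']
      simp [hs]
    · rw [pvDedup, if_neg hs, List.filter_cons, ih (S ++ [x]) h']
      have he : xs.filter (fun a => decide (a ∉ S ++ [x])) = xs.filter (fun a => decide (a ∉ S)) := by
        apply List.filter_congr
        intro a ha
        have hax : a ≠ x := fun c => hx (c ▸ ha)
        simp [List.mem_append, hax]
      rw [he]
      simp [hs]

-- content-level lift: deduplicating indices first does not change the content dedup
theorem pvDedup_lift (L : List String) (J : List Nat) :
    ∀ (S : List Nat) (s : List String), (∀ j ∈ S, pvGd L j ∈ s) →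
      pvDedup s ((pvDedup S J).map (pvGd L)) = pvDedup s (J.map (pvGd L)) := by
  induction J with
  | nil => intro S s _; rfl
  | cons j J ih =>
    intro S s h
    by_cases hS : j ∈ S
    · rw [pvDedup, if_pos hS, List.map_cons, pvDedup, if_pos (h j hS)]
      exact ih S s h
    · rw [pvDedup, if_neg hS, List.map_cons, List.map_cons]
      by_cases hs : pvGd L j ∈ s
      · rw [pvDedup, pvDedup, if_pos hs, if_pos hs]
        refine ih (S ++ [j]) s (fun a ha => ?_)
        rcases List.mem_append.mp ha with h' | h'
        · exact h a h'
        · simp only [List.mem_singleton] at h'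
          subst h'; exact hs
      · rw [pvDedup, pvDedup, if_neg hs, if_neg hs]
        refine congrArg (pvGd L j :: ·) (ih (S ++ [j]) (s ++ [pvGd L j]) (fun a ha => ?_))
        rcases List.mem_append.mp ha with h' | h'
        · exact List.mem_append.mpr (Or.inl (h a h'))
        · simp only [List.mem_singleton] at h'
          subst h'
          exact List.mem_append.mpr (Or.inr (by simp))

theorem pvMem_win {n k : Nat} (hk : k < n) (j : Nat) :
    j ∈ pvWin n k ↔ k - 1 ≤ j ∧ j < min n (k + 2) := by
  rw [pvWin, List.mem_range'_1]
  omega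

-- strictly increasing keys produce a strictly increasing deduplicated index stream
theorem pvSortedS (n : Nat) (ks : List Nat) :
    ∀ (S : List Nat) (b : Nat),
      List.Pairwise (· < ·) ks → (∀ k ∈ ks, k < n) → (∀ k ∈ ks, b ≤ k + 2) →
      (∀ k ∈ ks, ∀ j ∈ pvWin n k, j ∈ S ∨ b ≤ j) →
      List.Pairwise (· < ·) (pvDedup S (ks.flatMap (pvWin n))) ∧
        ∀ j ∈ pvDedup S (ks.flatMap (pvWin n)), b ≤ j := by
  induction ks with
  | nil =>
    intro S b _ _ _ _
    constructor
    · exact List.Pairwise.nil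
    · intro j hj; simp [pvDedup] at hj
  | cons k ks ih =>
    intro S b hpw hlt hb hS
    have hkn : k < n := hlt k (by simp)
    rw [List.flatMap_cons, pvDedup_append]
    have hWnd : (pvWin n k).Nodup := by
      unfold pvWin; exact List.nodup_range' 1
    have hWpw : List.Pairwise (· < ·) (pvDedup S (pvWin n k)) := by
      rw [pvDedup_nodup (pvWin n k) S hWnd]
      refine List.Pairwise.filter _ ?_
      unfold pvWin; exact List.pairwise_lt_range' 1
    have hWlt : ∀ j ∈ pvDedup S (pvWin n k), j < k + 2 := by
      intro j hj
      have := ((pvMem_win hkn j).mp ((pvMem_dedup _ _ _).mp hj).1).2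
      omega
    have hWb : ∀ j ∈ pvDedup S (pvWin n k), b ≤ j := by
      intro j hj
      have hm := (pvMem_dedup _ _ _).mp hj
      rcases hS k (by simp) j hm.1 with h | h
      · exact absurd h hm.2
      · exact h
    have hrest := ih (S ++ pvWin n k) (k + 2) hpw.of_cons
      (fun k' hk' => hlt k' (by simp [hk']))
      (fun k' hk' => by have := List.rel_of_pairwise_cons hpw hk'; omega)
      (fun k' hk' j hj => by
        have hk'n : k' < n := hlt k' (by simp [hk'])
        have hkk' : k < k' := List.rel_of_pairwise_cons hpw hk'
        rcases (pvMem_win hk'n j).mp hj with ⟨h1, h2⟩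
        by_cases hj2 : k + 2 ≤ j
        · exact Or.inr hj2
        · refine Or.inl (List.mem_append.mpr (Or.inr ?_))
          rw [pvMem_win hkn]
          omega)
    constructor
    · rw [List.pairwise_append]
      refine ⟨hWpw, hrest.1, fun a ha b' hb' => ?_⟩
      have h1 := hWlt a ha
      have h2 := hrest.2 b' hb'
      omega
    · intro j hj
      rcases List.mem_append.mp hj with h | h
      · exact hWb j h
      · have h1 := hrest.2 j h
        have h2 := hb k (by simp)
        omega

theorem pvEq_sorted_mem (xs : List Nat) :
    ∀ ys : List Nat, List.Pairwise (· < ·) xs → List.Pairwise (· < ·) ys →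
      (∀ a, a ∈ xs ↔ a ∈ ys) → xs = ys := by
  induction xs with
  | nil =>
    intro ys _ _ h
    cases ys with
    | nil => rfl
    | cons y ys => exact absurd ((h y).mpr (by simp)) (by simp)
  | cons x xs ih =>
    intro ys hx hy h
    cases ys with
    | nil => exact absurd ((h x).mp (by simp)) (by simp)
    | cons y ys =>
      have hxy : x = y := by
        rcases List.mem_cons.mp ((h x).mp (by simp)) with h1 | h1
        · exact h1
        · have hyx : y < x := List.rel_of_pairwise_cons hy h1
          rcases List.mem_cons.mp ((h y).mpr (by simp)) with h2 | h2
          · omega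
          · have := List.rel_of_pairwise_cons hx h2
            omega
      subst hxy
      refine congrArg (x :: ·) (ih ys hx.of_cons hy.of_cons (fun a => ?_))
      constructor
      · intro ha
        rcases List.mem_cons.mp ((h a).mp (by simp [ha])) with rfl | h'
        · exact absurd (List.rel_of_pairwise_cons hx ha) (lt_irrefl _)
        · exact h'
      · intro ha
        rcases List.mem_cons.mp ((h a).mpr (by simp [ha])) with rfl | h'
        · exact absurd (List.rel_of_pairwise_cons hy ha) (lt_irrefl _)
        · exact h'

-- the deduplicated window stream is exactly the selected indices in increasing order
theorem pvIdx_eq (L : List String) :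
    pvDedup [] ((pvKeys L).flatMap (pvWin L.length)) =
      (List.range L.length).filter (fun j => pvSel L j) := by
  have hkpw : List.Pairwise (· < ·) (pvKeys L) := List.Pairwise.filter _ List.pairwise_lt_range
  have hklt : ∀ k ∈ pvKeys L, k < L.length := by
    intro k hk
    have := List.mem_filter.mp hk
    simpa using List.mem_range.mp this.1
  refine pvEq_sorted_mem _ _ ?_ ?_ ?_
  · exact (pvSortedS L.length (pvKeys L) [] 0 hkpw hklt (fun _ _ => by omega)
      (fun _ _ j _ => Or.inr (Nat.zero_le j))).1
  · exact List.Pairwise.filter _ List.pairwise_lt_range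
  · intro a
    rw [pvMem_dedup]
    simp only [List.not_mem_nil, not_false_iff, and_true, List.mem_flatMap,
      List.mem_filter, List.mem_range]
    constructor
    · rintro ⟨k, hk, ha⟩
      have hk' := List.mem_filter.mp hk
      have hkn : k < L.length := by simpa using List.mem_range.mp hk'.1
      have hp : pvP (pvGd L k) = true := hk'.2
      rcases (pvMem_win hkn a).mp ha with ⟨h1, h2⟩
      have han : a < L.length := by omega
      refine ⟨han, ?_⟩
      have hcase : k = a ∨ k = a + 1 ∨ (k = a - 1 ∧ 1 ≤ a) := by omega
      rcases hcase with hc | hc | ⟨hc, hc1⟩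
      · subst hc
        simp [pvSel, pvKeyN, hkn, hp]
      · subst hc
        simp [pvSel, pvKeyN, hkn, hp]
      · subst hc
        simp [pvSel, pvKeyN, hkn, hp, hc1]
    · rintro ⟨han, hsel⟩
      simp only [pvSel, Bool.or_eq_true, Bool.and_eq_true, decide_eq_true_eq, pvKeyN] at hsel
      rcases hsel with (⟨h1, h2, h3⟩ | ⟨h2, h3⟩) | ⟨h2, h3⟩
      · refine ⟨a - 1, List.mem_filter.mpr ⟨List.mem_range.mpr h2, h3⟩, ?_⟩
        rw [pvMem_win h2]; omega
      · refine ⟨a, List.mem_filter.mpr ⟨List.mem_range.mpr h2, h3⟩, ?_⟩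
        rw [pvMem_win h2]; omega
      · refine ⟨a + 1, List.mem_filter.mpr ⟨List.mem_range.mpr h2, h3⟩, ?_⟩
        rw [pvMem_win h2]; omega

-- A's dedup loop is pvDedup
theorem pvFoldA (xs : List String) :
    ∀ (seen : PySem.Set String) (acc : List String),
      (xs.foldl (fun (st : PySem.Set String × List String) l =>
        if PySem.Set.contains st.1 l then st else (PySem.Set.add st.1 l, st.2 ++ [l]))
        (seen, acc)).2 = acc ++ pvDedup seen xs := by
  induction xs with
  | nil => intro seen acc; simp [pvDedup]
  | cons x xs ih =>
    intro seen acc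
    have hc : PySem.Set.contains seen x = decide (x ∈ seen) := by simp [PySem.Set.contains]
    by_cases hx : x ∈ seen
    · rw [List.foldl_cons]
      simp only [hc, hx, decide_true, if_true]
      rw [ih seen acc, pvDedup, if_pos hx]
    · have hadd : PySem.Set.add seen x = seen ++ [x] := by
        simp [PySem.Set.add, PySem.Set.contains, hx]
      rw [List.foldl_cons]
      simp only [hc, hx, decide_false, Bool.false_eq_true, if_false]
      rw [hadd, ih (seen ++ [x]) (acc ++ [x]), pvDedup, if_neg hx]
      simp

-- B's loop is a filter followed by pvDedup
theorem pvFoldB (xs : List (Int × String)) (q : Int × String → Bool) :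
    ∀ (seen : PySem.Set String) (acc : List String),
      (xs.foldl (fun (st : PySem.Set String × List String) p =>
        if q p && !(PySem.Set.contains st.1 p.2) then (PySem.Set.add st.1 p.2, st.2 ++ [p.2]) else st)
        (seen, acc)).2 = acc ++ pvDedup seen ((xs.filter q).map (·.2)) := by
  induction xs with
  | nil => intro seen acc; simp [pvDedup]
  | cons p xs ih =>
    intro seen acc
    have hc : PySem.Set.contains seen p.2 = decide (p.2 ∈ seen) := by simp [PySem.Set.contains]
    rw [List.foldl_cons, List.filter_cons]
    cases hq : q p with
    | false =>
      simp only [hq, Bool.false_and, Bool.false_eq_true, if_false, List.map_cons]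
      exact ih seen acc
    | true =>
      by_cases hx : p.2 ∈ seen
      · simp only [hq, hc, hx, decide_true, Bool.not_true, Bool.and_false, Bool.false_eq_true,
          Bool.true_and, if_false, if_true, List.map_cons]
        rw [ih seen acc, pvDedup, if_pos hx]
      · have hadd : PySem.Set.add seen p.2 = seen ++ [p.2] := by
          simp [PySem.Set.add, PySem.Set.contains, hx]
        simp only [hq, hc, hx, decide_false, Bool.not_false, Bool.and_true, Bool.true_and,
          if_true, List.map_cons]
        rw [hadd, ih (seen ++ [p.2]) (acc ++ [p.2]), pvDedup, if_neg hx]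
        simp

theorem pvKeyB_cast (L : List String) (j : Nat) : pvKeyB L (j : Int) = pvKeyN L j := by
  by_cases h : j < L.length
  · have h1 : ¬ ((j : Int) < 0) := by omega
    have h2 : ¬ ((L.length : Int) ≤ (j : Int)) := by omega
    simp [pvKeyB, pvKeyN, pvP, pvGd, PySem.List.pyGetD_natCast, h, h1, h2]
  · have h2 : (L.length : Int) ≤ (j : Int) := by omega
    simp [pvKeyB, pvKeyN, h, h2]

theorem pvKeyB_cast_sub (L : List String) (j : Nat) :
    pvKeyB L ((j : Int) - 1) = (decide (1 ≤ j) && pvKeyN L (j - 1)) := by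
  by_cases hj : 1 ≤ j
  · have h : (j : Int) - 1 = ((j - 1 : Nat) : Int) := by omega
    rw [h, pvKeyB_cast]
    simp [hj]
  · have hj0 : j = 0 := by omega
    subst hj0
    norm_num [pvKeyB]

theorem pvKeyB_cast_add (L : List String) (j : Nat) :
    pvKeyB L ((j : Int) + 1) = pvKeyN L (j + 1) := by
  have h : ((j : Nat) : Int) + 1 = ((j + 1 : Nat) : Int) := by push_cast; ring
  rw [h, pvKeyB_cast]

theorem pvRange_natCast (a b : Nat) :
    PySem.List.pyRange (a : Int) (b : Int) = (List.range' a (b - a)).map (fun (k : Nat) => (k : Int)) := by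
  obtain ⟨m, hm⟩ : ∃ m, b - a = m := ⟨_, rfl⟩
  induction m generalizing a with
  | zero =>
    have hnil : PySem.List.pyRange (a : Int) (b : Int) = [] := by
      refine List.eq_nil_iff_forall_not_mem.mpr (fun x hx => ?_)
      rw [PySem.List.mem_pyRange_one] at hx
      omega
    rw [hnil, hm]
    rfl
  | succ m ihm =>
    have hab : a < b := by omega
    rw [PySem.List.pyRange_one_cons (by exact_mod_cast hab)]
    have h1 : (a : Int) + 1 = ((a + 1 : Nat) : Int) := by push_cast; ring
    have h3 : b - (a + 1) = m := by omega
    rw [h1, ihm (a + 1) h3, h3, hm, List.range'_succ, List.map_cons]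

theorem pvDrop_eq (L : List String) (m : Nat) :
    (List.range' m (L.length - m)).map (pvGd L) = L.drop m := by
  apply List.ext_getElem
  · simp
  · intro i h1 h2
    simp only [List.getElem_map, List.getElem_range', List.getElem_drop, pvGd]
    have hlen : i < L.length - m := by simpa using h1
    rw [List.getD_eq_getElem L "" (by omega)]
    congr 1
    omega

theorem pvFallback_eq (L : List String) :
    ((List.range L.length).filter (fun (j : Nat) => decide ((L.length : Int) ≤ (j : Int) + 5))).map (pvGd L) =
      L.drop (L.length - 5) := by
  have h1 : (List.range L.length).filter (fun (j : Nat) => decide ((L.length : Int) ≤ (j : Int) + 5)) =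
      List.range' (L.length - 5) (L.length - (L.length - 5)) := by
    refine pvEq_sorted_mem _ _ (List.Pairwise.filter _ List.pairwise_lt_range)
      (List.pairwise_lt_range' 1) (fun a => ?_)
    simp only [List.mem_filter, List.mem_range, List.mem_range'_1, decide_eq_true_eq]
    omega
  rw [h1, pvDrop_eq]

-- window bridge: the pyRange context window over Int is pvWin over Nat
theorem pvWindow_bridge (L : List String) (k : Nat) (hk : k < L.length) :
    (PySem.List.pyRange (max 0 ((k : Int) - 1)) (min ((L.length : Nat) : Int) ((k : Int) + 2))).map
        (fun j => PySem.List.pyGetD L j "") = (pvWin L.length k).map (pvGd L) := by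
  have h1 : max 0 ((k : Int) - 1) = ((k - 1 : Nat) : Int) := by omega
  have h2 : min ((L.length : Nat) : Int) ((k : Int) + 2) = ((min L.length (k + 2) : Nat) : Int) := by
    omega
  rw [h1, h2, pvRange_natCast, List.map_map, pvWin]
  apply List.map_congr_left
  intro j _
  simp [PySem.List.pyGetD_natCast, pvGd]

-- ===== VERDICT (by name: the statement is the Claim_ definition above) =====
theorem summarize_val_error_spec : Claim_equal_summarize_val_error := by
  intro output _
  show summarize_val_error output = summarize_val_error_alt output
  unfold summarize_val_error summarize_val_error_alt
  dsimp only
  set L : List String := ((PySem.Str.splitlines output).filter (fun l => PySem.Str.strip l ≠ "")).map PySem.Str.strip with hL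
  -- A: key-index loop → filter + map; window loop → flatMap; both dedup loops → pvDedup
  rw [PySem.List.foldl_append_if]
  rw [List.filter_congr (fun (x : Int × String) (_ : x ∈ PySem.List.enumerate L) => pvP_cond x.2)]
  rw [PySem.List.foldl_append_eq_flatMap]
  rw [pvFoldA, pvFoldB]
  have hse : @PySem.Set.empty String = ([] : List String) := rfl
  rw [hse]
  simp only [List.nil_append]
  -- enumerate → indexed map over range
  have hen : PySem.List.enumerate L = (List.range L.length).map (fun (j : Nat) => ((j : Int), pvGd L j)) := by
    have hlen : PySem.List.len L = (L.length : Int) := rfl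
    rw [PySem.List.enumerate_eq_map_pyRange L "", hlen, PySem.List.pyRange_zero_natCast, List.map_map]
    refine List.map_congr_left (fun j _ => ?_)
    simp [PySem.List.pyGetD_natCast, pvGd]
  rw [hen]
  simp only [List.filter_map, List.map_map, Function.comp_def]
  rw [List.flatMap_map]
  have hkeysr : (List.range L.length).filter (fun j => pvP (pvGd L j)) = pvKeys L := rfl
  rw [hkeysr]
  have hklt : ∀ k ∈ pvKeys L, k < L.length := by
    intro k hk
    have := (List.mem_filter.mp hk).1
    simpa using this
  rw [List.flatMap_congr (fun k hk => pvWindow_bridge L k (hklt k hk))]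
  rw [← List.map_flatMap]
  -- B: anyKey over pyRange → any over range
  have hany : (PySem.List.pyRange 0 ((L.length : Nat) : Int)).any (fun i => pvKeyB L i) =
      (List.range L.length).any (fun j => pvP (pvGd L j)) := by
    rw [PySem.List.pyRange_zero_natCast, List.any_map]
    refine PySem.List.any_congr_mem (fun j hj => ?_)
    have hjn : j < L.length := List.mem_range.mp hj
    simp [Function.comp, pvKeyB_cast, pvKeyN, hjn]
  rw [hany]
  by_cases hK : pvKeys L = []
  · -- no keyword line: both take the last-five fallback
    have hfalse : (List.range L.length).any (fun j => pvP (pvGd L j)) = false := by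
      rw [List.any_eq_false]
      intro x hx
      unfold pvKeys at hK
      exact fun hpx => (List.filter_eq_nil_iff.mp hK) x hx hpx
    rw [hK, hfalse]
    simp only [List.flatMap_nil, List.map_nil, Bool.false_eq_true, if_false,
      eq_self_iff_true, if_true]
    rw [PySem.List.slice_from_neg_ofNat L 5 (by norm_num)]
    rw [pvFallback_eq]
  · -- some keyword line: both keep the selected neighbourhood indices, deduped
    have htrue : (List.range L.length).any (fun j => pvP (pvGd L j)) = true := by
      obtain ⟨k, hk⟩ := List.exists_mem_of_ne_nil _ hK
      rw [List.any_eq_true]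
      unfold pvKeys at hk
      have hm := List.mem_filter.mp hk
      exact ⟨k, hm.1, hm.2⟩
    rw [htrue]
    have hne : (List.map (pvGd L) ((pvKeys L).flatMap (pvWin L.length))) ≠ [] := by
      obtain ⟨k, hk⟩ := List.exists_mem_of_ne_nil _ hK
      have hkn := hklt k hk
      have hwk : k ∈ pvWin L.length k := (pvMem_win hkn k).mpr (by omega)
      exact List.ne_nil_of_mem (List.mem_map_of_mem (List.mem_flatMap.mpr ⟨k, hk, hwk⟩))
    rw [if_neg hne]
    simp only [eq_self_iff_true, if_true]
    rw [← pvDedup_lift L ((pvKeys L).flatMap (pvWin L.length)) [] []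
      (fun j h => absurd h (List.not_mem_nil (a := j)))]
    rw [pvIdx_eq]
    have hQ : ∀ j ∈ List.range L.length,
        (pvKeyB L ((j : Int) - 1) || pvKeyB L (j : Int) || pvKeyB L ((j : Int) + 1)) = pvSel L j := by
      intro j _
      rw [pvKeyB_cast_sub, pvKeyB_cast, pvKeyB_cast_add]
      rfl
    rw [List.filter_congr hQ]
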